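-- pv_equiv track=rewrite | github.com/Mahdisellami/Hrisa-Code | src/hrisa_code/core/interface/interactive.py | is_exit_command
-- ===== SOURCE A (Python) =====
-- def levenshtein_distance(s1: str, s2: str) -> int:
--     """Calculate Levenshtein distance between two strings.
--
--     Args:
--         s1: First string
--         s2: Second string
--
--     Returns:
--         Edit distance between strings
--     """
--     if len(s1) < len(s2):
--         return levenshtein_distance(s2, s1)
--
--     if len(s2) == 0:
--         return len(s1)
--
--     previous_row = range(len(s2) + 1)
--     for i, c1 in enumerate(s1):
--         current_row = [i + 1]
--         for j, c2 in enumerate(s2):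
--             insertions = previous_row[j + 1] + 1
--             deletions = current_row[j] + 1
--             substitutions = previous_row[j] + (c1 != c2)
--             current_row.append(min(insertions, deletions, substitutions))
--         previous_row = current_row
--
--     return previous_row[-1]
--
-- def is_exit_command(user_input: str) -> bool:
--     """Check if user input is an exit-like command (with typo tolerance).
--
--     Args:
--         user_input: User's input string
--
--     Returns:
--         True if input looks like an exit command
--     """
--     user_input = user_input.strip().lower()
--
--     # Exact matches for common exit synonyms
--     exit_synonyms = {"exit", "quit", "q", "bye", "leave", "close", "stop"}
--     if user_input in exit_synonyms:
--         return True
--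
--     # Check for typos with edit distance <= 2
--     for synonym in exit_synonyms:
--         if len(user_input) > 1 and levenshtein_distance(user_input, synonym) <= 2:
--             return True
--
--     return False
-- ===== SOURCE B (Python) =====
-- def _lev(s1: str, s2: str) -> int:
--     """Naive recursive Levenshtein distance, peeling the last characters."""
--     if not s1:
--         return len(s2)
--     if not s2:
--         return len(s1)
--     cost = 0 if s1[-1] == s2[-1] else 1
--     return min(_lev(s1[:-1], s2) + 1,
--                _lev(s1, s2[:-1]) + 1,
--                _lev(s1[:-1], s2[:-1]) + cost)
--
-- def is_exit_command(user_input: str) -> bool: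
--     s = user_input.strip().lower()
--     synonyms = ("exit", "quit", "q", "bye", "leave", "close", "stop")
--     if s in synonyms:
--         return True
--     if len(s) <= 1:
--         return False
--     # edit distance is at least the length difference, so long inputs are rejected cheaply
--     return any(abs(len(s) - len(w)) <= 2 and _lev(s, w) <= 2 for w in synonyms)
-- ===== Notes on version B (the rewrite author's own statement) =====
-- stated objective: simpler
-- what changed: levenshtein_distance's iterative DP row table is replaced by the textbook naive recursion on the last characters, and the wrapper hoists the len>1 guard and prunes synonyms whose length differs by more than 2 (edit distance is at least the length difference) before recursing, using any() over a tuple instead of a loop over a set.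
import Mathlib
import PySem

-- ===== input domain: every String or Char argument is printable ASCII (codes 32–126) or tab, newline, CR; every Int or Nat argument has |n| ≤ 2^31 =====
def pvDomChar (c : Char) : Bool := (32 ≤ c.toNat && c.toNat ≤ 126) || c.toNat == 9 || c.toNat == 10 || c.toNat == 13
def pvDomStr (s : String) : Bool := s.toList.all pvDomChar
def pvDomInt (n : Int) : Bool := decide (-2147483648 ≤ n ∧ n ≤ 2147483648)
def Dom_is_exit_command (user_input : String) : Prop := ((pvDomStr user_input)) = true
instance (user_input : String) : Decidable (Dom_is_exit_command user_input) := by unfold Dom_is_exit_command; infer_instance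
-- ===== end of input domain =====

-- B replaces A's DP row table for the edit distance by the textbook naive recursion on the
-- last characters, with a cheap length-difference prune in the wrapper; objective: simpler.

-- ===== PORT A =====
-- inner loop body of A's levenshtein_distance ('for j, c2 in enumerate(s2)')
def pvInnerA (previous_row : List Int) (c1 : Char) (cur : List Int) (jc : Int × Char) : List Int :=
  let insertions := PySem.List.pyGetD previous_row (jc.1 + 1) 0 + 1
  let deletions := PySem.List.pyGetD cur jc.1 0 + 1
  let substitutions := PySem.List.pyGetD previous_row jc.1 0 + (if c1 ≠ jc.2 then 1 else 0)
  cur ++ [min (min insertions deletions) substitutions]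

-- outer loop body ('for i, c1 in enumerate(s1)'); current_row starts as [i + 1]
def pvOuterA (s2 : List Char) (previous_row : List Int) (ic : Int × Char) : List Int :=
  (PySem.List.enumerate s2 0).foldl (pvInnerA previous_row ic.2) [ic.1 + 1]

def levenshtein_distance (s1 s2 : List Char) : Int :=
  if h : s1.length < s2.length then levenshtein_distance s2 s1
  else if s2.length = 0 then (s1.length : Int)
  else
    let previous_row := PySem.List.pyRange 0 ((s2.length : Int) + 1) 1
    let final := (PySem.List.enumerate s1 0).foldl (pvOuterA s2) previous_row
    PySem.List.pyGetD final (-1) 0   -- previous_row[-1]; the row is nonempty here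
termination_by s2.length
decreasing_by exact h

def is_exit_command (user_input : String) : Bool :=
  let u := PySem.Chars.lower (PySem.Chars.strip user_input.toList)
  let exit_synonyms : PySem.Set (List Char) := PySem.Set.ofList
    ["exit".toList, "quit".toList, "q".toList, "bye".toList, "leave".toList, "close".toList, "stop".toList]
  if PySem.Set.contains exit_synonyms u then true
  else
    -- 'for synonym in exit_synonyms: if …: return True' ≡ any; a set's iteration order cannot affect an 'or'
    exit_synonyms.any (fun synonym =>
      decide (1 < u.length) && decide (levenshtein_distance u synonym ≤ 2))

-- ===== PORT B =====
-- naive recursive Levenshtein distance, peeling the last characters (Source B's _lev)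
def pvLevRec (s1 s2 : List Char) : Int :=
  if h1 : s1 = [] then (s2.length : Int)
  else if h2 : s2 = [] then (s1.length : Int)
  else
    let cost : Int := if s1.getLast h1 = s2.getLast h2 then 0 else 1
    min (min (pvLevRec s1.dropLast s2 + 1) (pvLevRec s1 s2.dropLast + 1))
        (pvLevRec s1.dropLast s2.dropLast + cost)
termination_by s1.length + s2.length
decreasing_by
  · have := List.length_pos_of_ne_nil h1; simp [List.length_dropLast]; omega
  · have := List.length_pos_of_ne_nil h2; simp [List.length_dropLast]; omega
  · have := List.length_pos_of_ne_nil h1; have := List.length_pos_of_ne_nil h2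
    simp [List.length_dropLast]; omega

def is_exit_command_alt (user_input : String) : Bool :=
  let s := PySem.Chars.lower (PySem.Chars.strip user_input.toList)
  let synonyms : List (List Char) :=
    ["exit".toList, "quit".toList, "q".toList, "bye".toList, "leave".toList, "close".toList, "stop".toList]
  if synonyms.contains s then true
  else if s.length ≤ 1 then false
  else
    synonyms.any (fun w =>
      decide (|(s.length : Int) - (w.length : Int)| ≤ 2) && decide (pvLevRec s w ≤ 2))

-- ===== PRECONDITION & SPEC =====
def Spec_is_exit_command (user_input : String) (out : Bool) : Prop := out = is_exit_command_alt user_input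
instance (user_input : String) (out : Bool) : Decidable (Spec_is_exit_command user_input out) := by unfold Spec_is_exit_command; infer_instance

-- ===== CLAIM (what is proved, stated in full; the proofs are below) =====
def Claim_equal_is_exit_command : Prop := ∀ (user_input : String), Dom_is_exit_command user_input → Spec_is_exit_command user_input (is_exit_command user_input)

-- ===== LEMMAS AND PROOFS =====

theorem pvLevRec_nil_left (y : List Char) : pvLevRec [] y = (y.length : Int) := by
  rw [pvLevRec]; simp

theorem pvLevRec_nil_right (x : List Char) : pvLevRec x [] = (x.length : Int) := by
  rw [pvLevRec]
  by_cases h1 : x = []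
  · simp [h1]
  · rw [dif_neg h1, dif_pos rfl]

theorem pvLevRec_concat (x y : List Char) (a b : Char) :
    pvLevRec (x ++ [a]) (y ++ [b]) =
      min (min (pvLevRec x (y ++ [b]) + 1) (pvLevRec (x ++ [a]) y + 1))
          (pvLevRec x y + (if a = b then 0 else 1)) := by
  rw [pvLevRec]
  simp

theorem pvLevRec_comm (x y : List Char) : pvLevRec x y = pvLevRec y x := by
  suffices h : ∀ n (x y : List Char), x.length + y.length = n → pvLevRec x y = pvLevRec y x from
    h _ x y rfl
  intro n
  induction n using Nat.strong_induction_on with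
  | _ n IH =>
    intro x y hn
    rcases List.eq_nil_or_concat x with hx | ⟨x', a, hx⟩
    · subst hx; rw [pvLevRec_nil_left, pvLevRec_nil_right]
    · rcases List.eq_nil_or_concat y with hy | ⟨y', b, hy⟩
      · subst hy; rw [pvLevRec_nil_left, pvLevRec_nil_right]
      · subst hx hy
        simp only [List.concat_eq_append, List.length_append, List.length_cons,
          List.length_nil] at hn
        simp only [List.concat_eq_append]
        rw [pvLevRec_concat, pvLevRec_concat]
        rw [IH (x'.length + (y' ++ [b]).length) (by simp; omega) x' (y' ++ [b]) rfl]
        rw [IH ((x' ++ [a]).length + y'.length) (by simp; omega) (x' ++ [a]) y' rfl]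
        rw [IH (x'.length + y'.length) (by omega) x' y' rfl]
        have hc : (if a = b then (0 : Int) else 1) = (if b = a then (0 : Int) else 1) := by
          by_cases h : a = b
          · simp [h]
          · rw [if_neg h, if_neg (fun hba => h hba.symm)]
        rw [hc]
        omega

theorem pvLevRec_lb (x y : List Char) :
    (x.length : Int) - y.length ≤ pvLevRec x y ∧ (y.length : Int) - x.length ≤ pvLevRec x y := by
  suffices h : ∀ n (x y : List Char), x.length + y.length = n →
      (x.length : Int) - y.length ≤ pvLevRec x y ∧ (y.length : Int) - x.length ≤ pvLevRec x y from
    h _ x y rfl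
  intro n
  induction n using Nat.strong_induction_on with
  | _ n IH =>
    intro x y hn
    rcases List.eq_nil_or_concat x with hx | ⟨x', a, hx⟩
    · subst hx; rw [pvLevRec_nil_left]; simp
    · rcases List.eq_nil_or_concat y with hy | ⟨y', b, hy⟩
      · subst hy; rw [pvLevRec_nil_right]; simp
      · subst hx hy
        simp only [List.concat_eq_append, List.length_append, List.length_cons,
          List.length_nil] at hn ⊢
        rw [pvLevRec_concat]
        have h1 := IH (x'.length + (y' ++ [b]).length) (by simp; omega) x' (y' ++ [b]) rfl
        have h2 := IH ((x' ++ [a]).length + y'.length) (by simp; omega) (x' ++ [a]) y' rfl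
        have h3 := IH (x'.length + y'.length) (by omega) x' y' rfl
        simp only [List.length_append, List.length_cons, List.length_nil] at h1 h2 h3
        have hc : (0 : Int) ≤ (if a = b then (0 : Int) else 1) ∧
            (if a = b then (0 : Int) else 1) ≤ 1 := by split <;> omega
        push_cast at h1 h2 h3 ⊢
        omega

-- the DP row after processing prefix x of s1: entry j is the distance of x to s2's j-prefix
def pvRow (x s2 : List Char) : List Int :=
  (List.range (s2.length + 1)).map (fun j => pvLevRec x (s2.take j))

theorem pv_inner_aux (x : List Char) (c : Char) (s2 : List Char) :
    ∀ n j, j + n = s2.length →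
    (PySem.List.enumerate (s2.drop j) (j : Int)).foldl (pvInnerA (pvRow x s2) c)
      ((List.range (j + 1)).map (fun t => pvLevRec (x ++ [c]) (s2.take t)))
    = pvRow (x ++ [c]) s2 := by
  intro n
  induction n with
  | zero =>
    intro j hj
    have hj' : j = s2.length := by omega
    subst hj'
    rw [List.drop_length, PySem.List.enumerate_nil, List.foldl_nil]
    rfl
  | succ n IH =>
    intro j hj
    have hjlt : j < s2.length := by omega
    rw [List.drop_eq_getElem_cons hjlt, PySem.List.enumerate_cons, List.foldl_cons]
    have hstep : pvInnerA (pvRow x s2) c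
        ((List.range (j + 1)).map (fun t => pvLevRec (x ++ [c]) (s2.take t))) ((j : Int), s2[j])
        = (List.range (j + 1 + 1)).map (fun t => pvLevRec (x ++ [c]) (s2.take t)) := by
      unfold pvInnerA pvRow
      have e1 : ((j : Int) + 1) = ((j + 1 : Nat) : Int) := by push_cast; ring
      rw [e1, PySem.List.pyGetD_natCast, PySem.List.pyGetD_natCast, PySem.List.pyGetD_natCast]
      rw [PySem.List.getD_map_range _ _ _ _ (by omega), PySem.List.getD_map_range _ _ _ _ (by omega),
        PySem.List.getD_map_range _ _ _ _ (by omega)]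
      have htake : s2.take (j + 1) = s2.take j ++ [s2[j]] := by
        rw [List.take_succ]; simp [List.getElem?_eq_getElem hjlt]
      have hrec : pvLevRec (x ++ [c]) (s2.take (j + 1)) =
          min (min (pvLevRec x (s2.take (j + 1)) + 1) (pvLevRec (x ++ [c]) (s2.take j) + 1))
              (pvLevRec x (s2.take j) + (if c = s2[j] then 0 else 1)) := by
        rw [htake]
        have := pvLevRec_concat x (s2.take j) c s2[j]
        rw [← htake] at this ⊢
        rw [htake, pvLevRec_concat, ← htake]
      have hcost : (if ¬c = s2[j] then (1 : Int) else 0) = (if c = s2[j] then (0 : Int) else 1) := by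
        by_cases h : c = s2[j] <;> simp [h]
      rw [List.range_succ (n := j + 1), List.map_append]
      simp only [List.map_cons, List.map_nil]
      rw [hcost, ← hrec]
    rw [hstep]
    have e2 : ((j : Int) + 1) = ((j + 1 : Nat) : Int) := by push_cast; ring
    rw [e2]
    exact IH (j + 1) (by omega)

theorem pv_outer_aux (s2 : List Char) :
    ∀ rest x, (PySem.List.enumerate rest (x.length : Int)).foldl (pvOuterA s2) (pvRow x s2)
      = pvRow (x ++ rest) s2 := by
  intro rest
  induction rest with
  | nil => intro x; simp [PySem.List.enumerate_nil]
  | cons ch rest' IH =>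
    intro x
    rw [PySem.List.enumerate_cons, List.foldl_cons]
    have hstep : pvOuterA s2 (pvRow x s2) ((x.length : Int), ch) = pvRow (x ++ [ch]) s2 := by
      unfold pvOuterA
      have hinit : [((x.length : Int)) + 1] =
          (List.range (0 + 1)).map (fun t => pvLevRec (x ++ [ch]) (s2.take t)) := by
        simp [pvLevRec_nil_right]
      rw [hinit]
      have h0 : ((0 : Nat) : Int) = (0 : Int) := by norm_num
      have := pv_inner_aux x ch s2 s2.length 0 (by omega)
      rw [List.drop_zero] at this
      simpa using this
    rw [hstep]
    have e : (x.length : Int) + 1 = (((x ++ [ch]).length : Nat) : Int) := by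
      simp
    rw [e, IH (x ++ [ch])]
    simp

theorem pv_dp_eq_of_ge (s1 s2 : List Char) (h : ¬ s1.length < s2.length) :
    levenshtein_distance s1 s2 = pvLevRec s1 s2 := by
  rw [levenshtein_distance, dif_neg h]
  by_cases h0 : s2.length = 0
  · rw [if_pos h0]
    have hs2 : s2 = [] := List.eq_nil_of_length_eq_zero h0
    subst hs2
    rw [pvLevRec_nil_right]
  · rw [if_neg h0]
    have hinit : PySem.List.pyRange 0 ((s2.length : Int) + 1) 1 = pvRow [] s2 := by
      rw [PySem.List.pyRange_one]
      unfold pvRow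
      have ht : ((s2.length : Int) + 1 - 0).toNat = s2.length + 1 := by omega
      rw [ht]
      apply List.map_congr_left
      intro j hj
      rw [List.mem_range] at hj
      rw [pvLevRec_nil_left]
      simp [List.length_take]
      omega
    have houter := pv_outer_aux s2 s1 []
    simp only [List.length_nil, Nat.cast_zero, List.nil_append] at houter
    have hlast : PySem.List.pyGetD (pvRow s1 s2) (-1) 0 = pvLevRec s1 s2 := by
      unfold pvRow
      have hne : (List.range (s2.length + 1)).map (fun j => pvLevRec s1 (s2.take j)) ≠ [] := by
        simp
      rw [PySem.List.pyGetD_neg_one _ _ hne, List.getLast_eq_getElem]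
      simp
    simp only [hinit, houter, hlast]

theorem pv_dp_eq (s1 s2 : List Char) : levenshtein_distance s1 s2 = pvLevRec s1 s2 := by
  by_cases h : s1.length < s2.length
  · rw [levenshtein_distance, dif_pos h, pv_dp_eq_of_ge s2 s1 (by omega), pvLevRec_comm]
  · exact pv_dp_eq_of_ge s1 s2 h

theorem pv_cond (u w : List Char) (hu : 1 < u.length) :
    (decide (1 < u.length) && decide (levenshtein_distance u w ≤ 2)) =
    (decide (|(u.length : Int) - (w.length : Int)| ≤ 2) && decide (pvLevRec u w ≤ 2)) := by
  rw [pv_dp_eq]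
  have hl := pvLevRec_lb u w
  by_cases h2 : pvLevRec u w ≤ 2
  · have habs : |(u.length : Int) - (w.length : Int)| ≤ 2 := by rw [abs_le]; omega
    simp [hu, h2, habs]
  · simp [h2]

-- ===== VERDICT (by name: the statement is the Claim_ definition above) =====
theorem is_exit_command_spec : Claim_equal_is_exit_command := by
  intro s _hdom
  unfold Spec_is_exit_command
  simp only [is_exit_command, is_exit_command_alt]
  have hset : PySem.Set.ofList
      ["exit".toList, "quit".toList, "q".toList, "bye".toList, "leave".toList, "close".toList,
        "stop".toList] =
      (["exit".toList, "quit".toList, "q".toList, "bye".toList, "leave".toList, "close".toList,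
        "stop".toList] : List (List Char)) := by decide
  rw [hset, PySem.Set.contains_eq_listContains]
  set u := PySem.Chars.lower (PySem.Chars.strip s.toList) with hu
  set L : List (List Char) :=
    ["exit".toList, "quit".toList, "q".toList, "bye".toList, "leave".toList, "close".toList,
      "stop".toList] with hL
  by_cases hm : L.contains u = true
  · rw [if_pos hm, if_pos hm]
  · rw [if_neg hm, if_neg hm]
    by_cases hlen : u.length ≤ 1
    · rw [if_pos hlen]
      have hd : decide (1 < u.length) = false := by simp; omega
      simp [hd]
    · rw [if_neg hlen]
      have hu1 : 1 < u.length := by omega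
      exact congrArg (List.any L) (funext fun w => pv_cond u w hu1)
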